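-- pv_equiv track=rewrite | github.com/Newtonian-No/RAG | preprocess.py | _split_by_char
-- ===== SOURCE A (Python) =====
-- def _split_by_char(text, chunk_size, chunk_overlap):
--     chunks = []
--     text_length = len(text)
--     step = chunk_size - chunk_overlap
--
--     for i in range(0, text_length, step):
--         chunk = text[i:i+chunk_size].strip()
--         if chunk and (not chunks or chunk != chunks[-1]):  # 避免重复
--             chunks.append(chunk)
--     return chunks
-- ===== SOURCE B (Python) =====
-- def _split_by_char(text, chunk_size, chunk_overlap):
--     step = chunk_size - chunk_overlap
--     raw = [text[i:i+chunk_size].strip() for i in range(0, len(text), step)]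
--     nonempty = [c for c in raw if c]
--     result = []
--     i = 0
--     n = len(nonempty)
--     while i < n:
--         c = nonempty[i]
--         result.append(c)
--         while i < n and nonempty[i] == c:
--             i += 1
--     return result
-- ===== Notes on version B (the rewrite author's own statement) =====
-- stated objective: alternative
-- what changed: A's single fused loop that strips, tests emptiness and compares with the last appended chunk is restructured into a produce-then-reduce pipeline: build all stripped chunks by a comprehension, filter out empties, then collapse runs of consecutive equal chunks in a separate run-skipping pass.
import Mathlib
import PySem

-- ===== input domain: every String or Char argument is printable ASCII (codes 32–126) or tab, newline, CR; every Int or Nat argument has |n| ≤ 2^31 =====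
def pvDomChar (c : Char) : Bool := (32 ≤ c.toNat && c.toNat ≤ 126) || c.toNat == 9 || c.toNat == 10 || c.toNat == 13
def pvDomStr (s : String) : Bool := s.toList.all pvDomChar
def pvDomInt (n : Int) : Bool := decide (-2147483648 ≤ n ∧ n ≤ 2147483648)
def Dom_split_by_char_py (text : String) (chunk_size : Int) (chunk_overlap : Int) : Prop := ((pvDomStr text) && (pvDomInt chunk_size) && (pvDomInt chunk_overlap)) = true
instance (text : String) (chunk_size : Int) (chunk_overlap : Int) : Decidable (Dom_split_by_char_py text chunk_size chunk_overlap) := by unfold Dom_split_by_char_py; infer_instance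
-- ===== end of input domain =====

-- B re-decomposes A's fused strip-dedup loop into a produce-then-reduce pipeline (map, filter
-- empties, collapse runs of consecutive equals); same cost, alternative structure.

-- ===== PORT A =====
-- A's fused loop: for i in range(0, len(text), step): strip the slice; append if nonempty and
-- different from the last appended chunk.
def split_by_char_py (text : String) (chunk_size : Int) (chunk_overlap : Int) : List String :=
  let step := chunk_size - chunk_overlap
  (PySem.List.pyRange 0 (PySem.Str.len text) step).foldl
    (fun chunks i =>
      let chunk := PySem.Str.strip (PySem.Str.slice text (some i) (some (i + chunk_size)))
      if chunk ≠ "" ∧ (chunks = [] ∨ chunks.getLast? ≠ some chunk) then chunks ++ [chunk]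
      else chunks) []

-- ===== PORT B =====
-- run-skipping collapse of consecutive equal elements (B's outer/inner while loops)
def pvCollapse : List String → List String
  | [] => []
  | c :: rest => c :: pvCollapse (rest.dropWhile (· == c))
  termination_by l => l.length
  decreasing_by
    have := List.length_dropWhile_le (· == c) rest
    simp; omega

def split_by_char_py_alt (text : String) (chunk_size : Int) (chunk_overlap : Int) : List String :=
  let step := chunk_size - chunk_overlap
  let raw := (PySem.List.pyRange 0 (PySem.Str.len text) step).map
    (fun i => PySem.Str.strip (PySem.Str.slice text (some i) (some (i + chunk_size))))
  pvCollapse (raw.filter (fun c => c ≠ ""))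

-- ===== PRECONDITION & SPEC =====
-- Pre_ excludes exactly step = chunk_size - chunk_overlap = 0, where Python's range raises ValueError.
def Pre_split_by_char_py (text : String) (chunk_size : Int) (chunk_overlap : Int) : Prop :=
  chunk_size - chunk_overlap ≠ 0
instance (text : String) (chunk_size : Int) (chunk_overlap : Int) : Decidable (Pre_split_by_char_py text chunk_size chunk_overlap) := by unfold Pre_split_by_char_py; infer_instance

def pvWitness_split_by_char_py : String × Int × Int := ("aa aa aa", 4, 2)

def Spec_split_by_char_py (text : String) (chunk_size : Int) (chunk_overlap : Int) (out : List String) : Prop := out = split_by_char_py_alt text chunk_size chunk_overlap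
instance (text : String) (chunk_size : Int) (chunk_overlap : Int) (out : List String) : Decidable (Spec_split_by_char_py text chunk_size chunk_overlap out) := by unfold Spec_split_by_char_py; infer_instance

-- ===== CLAIM (what is proved, stated in full; the proofs are below) =====
def Claim_equal_split_by_char_py : Prop := ∀ (text : String) (chunk_size : Int) (chunk_overlap : Int), Dom_split_by_char_py text chunk_size chunk_overlap → Pre_split_by_char_py text chunk_size chunk_overlap → Spec_split_by_char_py text chunk_size chunk_overlap (split_by_char_py text chunk_size chunk_overlap)

-- ===== LEMMAS AND PROOFS =====

-- pvAux: A's append condition read off the tracked "last appended" option.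
def pvAux : Option String → List String → List String
  | _, [] => []
  | last, c :: rest => if c ≠ "" ∧ last ≠ some c then c :: pvAux (some c) rest else pvAux last rest

lemma foldA_eq (f : Int → String) :
    ∀ (l : List Int) (acc : List String),
      l.foldl (fun chunks i =>
        let chunk := f i
        if chunk ≠ "" ∧ (chunks = [] ∨ chunks.getLast? ≠ some chunk) then chunks ++ [chunk]
        else chunks) acc
      = acc ++ pvAux acc.getLast? (l.map f) := by
  intro l
  induction l with
  | nil => intro acc; simp [pvAux]
  | cons i rest ih =>
    intro acc
    simp only [List.foldl_cons, List.map_cons]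
    by_cases h : f i ≠ "" ∧ (acc = [] ∨ acc.getLast? ≠ some (f i))
    · have hcond : f i ≠ "" ∧ acc.getLast? ≠ some (f i) := by
        rcases h with ⟨h1, h2 | h2⟩
        · exact ⟨h1, by simp [h2]⟩
        · exact ⟨h1, h2⟩
      simp only [h, ih]
      rw [pvAux, if_pos hcond]
      simp [hcond.1]
    · have hcond : ¬ (f i ≠ "" ∧ acc.getLast? ≠ some (f i)) := by
        intro ⟨h1, h2⟩; exact h ⟨h1, Or.inr h2⟩
      simp only [h, ih]
      rw [pvAux, if_neg hcond]
      simp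

-- pvAuxF: pvAux after the empty-string filter has been pulled out.
def pvAuxF : Option String → List String → List String
  | _, [] => []
  | last, c :: rest => if last ≠ some c then c :: pvAuxF (some c) rest else pvAuxF last rest

lemma pvAux_filter : ∀ (xs : List String) (last : Option String),
    pvAux last xs = pvAuxF last (xs.filter (fun c => c ≠ "")) := by
  intro xs
  induction xs with
  | nil => intro last; simp [pvAux, pvAuxF]
  | cons c rest ih =>
    intro last
    by_cases hc : c = ""
    · subst hc
      rw [pvAux, if_neg (by simp)]
      simp [ih]
    · rw [pvAux]
      have : (List.filter (fun c => decide ¬c = "") (c :: rest)) =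
          c :: List.filter (fun c => decide ¬c = "") rest := by
        simp [hc]
      rw [show ((c :: rest).filter (fun c => c ≠ "")) =
          c :: (rest.filter (fun c => c ≠ "")) from this]
      rw [pvAuxF]
      by_cases hl : last ≠ some c
      · rw [if_pos ⟨hc, hl⟩, if_pos hl, ih]
      · rw [if_neg (by tauto), if_neg hl, ih]

lemma pvAuxF_some : ∀ (rest : List String) (a : String),
    pvAuxF (some a) rest = pvCollapse (rest.dropWhile (· == a)) := by
  intro rest
  induction rest with
  | nil => intro a; simp [pvAuxF, pvCollapse]
  | cons d rest' ih =>
    intro a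
    rw [pvAuxF]
    by_cases hd : d = a
    · subst hd
      rw [if_neg (by simp), ih, List.dropWhile_cons_of_pos (by simp)]
    · rw [if_pos (by simp [Ne.symm hd]), ih,
        List.dropWhile_cons_of_neg (by simp [hd])]
      rw [pvCollapse]

lemma pvAuxF_none : ∀ (ys : List String), pvAuxF none ys = pvCollapse ys := by
  intro ys
  cases ys with
  | nil => simp [pvAuxF, pvCollapse]
  | cons c rest =>
    rw [pvAuxF, if_pos (by simp), pvAuxF_some, pvCollapse]

-- ===== VERDICT (by name: the statement is the Claim_ definition above) =====
theorem split_by_char_py_spec : Claim_equal_split_by_char_py := by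
  intro text chunk_size chunk_overlap _ _
  unfold Spec_split_by_char_py split_by_char_py split_by_char_py_alt
  rw [foldA_eq]
  simp [pvAux_filter, pvAuxF_none]
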